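-- pv_equiv track=rewrite | github.com/MMC2K09/WordBreaker_saradinersangbad | streamlit_app.py | insert_two_characters
-- ===== SOURCE A (Python) =====
-- def insert_two_characters(word, insert_char):
--     """Insert exactly 2 characters between letters of a word."""
--     result = ""
--     insert_count = 0
--     for i, char in enumerate(word):
--         result += char
--         if i < len(word) - 1 and insert_count < 2:
--             result += insert_char
--             insert_count += 1
--     return result
-- ===== SOURCE B (Python) =====
-- def insert_two_characters(word, insert_char):
--     """Insert exactly 2 characters between letters of a word."""
--     if len(word) <= 1:
--         return word
--     if len(word) == 2:
--         return word[0] + insert_char + word[1]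
--     return word[0] + insert_char + word[1] + insert_char + word[2:]
-- ===== Notes on version B (the rewrite author's own statement) =====
-- stated objective: simpler
-- what changed: Replaced the enumerate loop with its counter and conditional inserts by direct length-based branches that build the result from word[0], word[1] and the slice word[2:].
import Mathlib
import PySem

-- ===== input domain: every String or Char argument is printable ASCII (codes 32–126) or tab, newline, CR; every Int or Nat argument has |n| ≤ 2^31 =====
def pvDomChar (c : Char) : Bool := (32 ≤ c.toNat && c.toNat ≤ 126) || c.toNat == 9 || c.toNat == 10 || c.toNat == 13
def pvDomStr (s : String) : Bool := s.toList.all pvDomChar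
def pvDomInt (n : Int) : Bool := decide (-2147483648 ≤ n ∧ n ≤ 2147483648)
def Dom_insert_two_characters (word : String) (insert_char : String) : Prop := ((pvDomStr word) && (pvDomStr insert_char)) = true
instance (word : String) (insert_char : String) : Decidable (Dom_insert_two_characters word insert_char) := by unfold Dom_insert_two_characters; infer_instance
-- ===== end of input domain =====

-- B replaces A's counter-carrying loop with direct length-based branches built from
-- slices (word[0] + c + word[1] + c + word[2:]); objective: simpler, no speed claim.

-- ===== PORT A =====
-- loop body of A's 'for i, char in enumerate(word)': state = (result, insert_count)
def itcStep (n : Int) (ic : List Char) (st : List Char × Int) (p : Int × Char) : List Char × Int :=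
  let result := st.1 ++ [p.2]
  if p.1 < n - 1 ∧ st.2 < 2 then (result ++ ic, st.2 + 1) else (result, st.2)

def insert_two_characters (word : String) (insert_char : String) : String :=
  String.ofList
    (((PySem.List.enumerate word.toList 0).foldl
        (itcStep (word.toList.length : Int) insert_char.toList) ([], 0)).1)

-- ===== PORT B =====
def insert_two_characters_alt (word : String) (insert_char : String) : String :=
  match word.toList with
  | [] => word                                   -- len(word) <= 1: return word
  | [_] => word
  | [a, b] => String.ofList ([a] ++ insert_char.toList ++ [b])   -- len == 2
  | a :: b :: rest =>                            -- word[0]+c+word[1]+c+word[2:]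
      String.ofList ([a] ++ insert_char.toList ++ [b] ++ insert_char.toList ++ rest)

-- ===== PRECONDITION & SPEC =====
def Spec_insert_two_characters (word : String) (insert_char : String) (out : String) : Prop := out = insert_two_characters_alt word insert_char
instance (word : String) (insert_char : String) (out : String) : Decidable (Spec_insert_two_characters word insert_char out) := by unfold Spec_insert_two_characters; infer_instance

-- ===== CLAIM (what is proved, stated in full; the proofs are below) =====
def Claim_equal_insert_two_characters : Prop := ∀ (word : String) (insert_char : String), Dom_insert_two_characters word insert_char → Spec_insert_two_characters word insert_char (insert_two_characters word insert_char)

-- ===== LEMMAS AND PROOFS =====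

-- once insert_count has reached 2, A's loop only appends the remaining characters
theorem itcStep_saturated (n : Int) (ic : List Char) (l : List (Int × Char)) (r : List Char) :
    l.foldl (itcStep n ic) (r, 2) = (r ++ l.map (·.2), 2) := by
  induction l generalizing r with
  | nil => simp
  | cons p t ih => simp [itcStep, ih]

-- ===== VERDICT (by name: the statement is the Claim_ definition above) =====
theorem insert_two_characters_spec : Claim_equal_insert_two_characters := by
  intro word ic _
  show insert_two_characters word ic = insert_two_characters_alt word ic
  unfold insert_two_characters insert_two_characters_alt
  have hw : String.ofList word.toList = word := by simp
  match hcs : word.toList with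
  | [] =>
      rw [hcs] at hw
      rw [← hw]
      simp [PySem.List.enumerate_nil]
  | [a] =>
      rw [hcs] at hw
      rw [← hw]
      simp [PySem.List.enumerate_cons, PySem.List.enumerate_nil, itcStep]
  | [a, b] =>
      norm_num [PySem.List.enumerate_cons, PySem.List.enumerate_nil, itcStep]
  | a :: b :: c :: rest =>
      have hn : (2:Int) ≤ ((a :: b :: c :: rest).length : Int) - 1 := by
        simp; omega
      simp only [PySem.List.enumerate_cons, List.foldl_cons]
      rw [show itcStep ((a :: b :: c :: rest).length : Int) ic.toList ([], 0) (0, a)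
            = ([a] ++ ic.toList, 1) by
        simp [itcStep]; omega]
      rw [show itcStep ((a :: b :: c :: rest).length : Int) ic.toList ([a] ++ ic.toList, 1) (0+1, b)
            = ([a] ++ ic.toList ++ [b] ++ ic.toList, 2) by
        simp [itcStep]]
      rw [show itcStep ((a :: b :: c :: rest).length : Int) ic.toList
            ([a] ++ ic.toList ++ [b] ++ ic.toList, 2) (0+1+1, c)
            = ([a] ++ ic.toList ++ [b] ++ ic.toList ++ [c], 2) by
        simp [itcStep]]
      rw [itcStep_saturated]
      simp [PySem.List.map_snd_enumerate]
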